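-- pv_equiv track=rewrite | github.com/mnuman/my-python-learnings | aoc-2017/src/day4b.py | word_aggregator
-- ===== SOURCE A (Python) =====
-- def word_aggregator(line):
--     """The result for the line is a LIST containing all the word's fingerprints
--        A fingerprint is a sorted concatenation of letters and their number of occurrences,
--        e.g. aap --> a2p1
--     """
--     res = []
--     for word in line.split():
--         word_fingerprint = ''
--         chars = {}
--         for c in word:
--             if c in chars:
--                 chars[c] += 1
--             else:
--                 chars[c] = 1
--         for k in sorted(chars):
--             word_fingerprint = word_fingerprint + k + str(chars[k])
--         res.append(word_fingerprint)
--     return res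
-- ===== SOURCE B (Python) =====
-- def _rle(s):
--     # run-length encode an already-sorted list of characters
--     if not s:
--         return ''
--     c = s[0]
--     rest = s[1:]
--     k = 0
--     while k < len(rest) and rest[k] == c:
--         k += 1
--     return c + str(k + 1) + _rle(rest[k:])
--
--
-- def word_aggregator(line):
--     return [_rle(sorted(word)) for word in line.split()]
-- ===== Notes on version B (the rewrite author's own statement) =====
-- stated objective: alternative
-- what changed: B drops A's per-word dict counting plus separate key sort: it sorts each word's characters once and run-length encodes the sorted list recursively, deriving each count from the run length.
import Mathlib
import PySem

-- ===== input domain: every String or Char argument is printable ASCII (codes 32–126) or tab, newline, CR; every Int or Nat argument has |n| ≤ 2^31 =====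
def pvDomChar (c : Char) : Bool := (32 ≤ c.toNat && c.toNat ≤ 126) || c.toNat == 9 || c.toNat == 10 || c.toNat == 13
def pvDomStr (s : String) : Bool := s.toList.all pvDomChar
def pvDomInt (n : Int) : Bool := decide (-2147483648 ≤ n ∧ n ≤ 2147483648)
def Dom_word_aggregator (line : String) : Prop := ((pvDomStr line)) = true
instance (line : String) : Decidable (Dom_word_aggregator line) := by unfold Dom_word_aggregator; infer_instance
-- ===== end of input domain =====

-- B replaces A's per-word hash counting + key sort by sorting each word once and
-- run-length encoding the sorted characters (objective: alternative algorithm, no dict).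

-- ===== PORT A =====
def word_aggregator (line : String) : List String :=
  (PySem.Str.split₀ line).foldl (fun res word =>
    let chars : PySem.Dict Char Int :=
      word.toList.foldl (fun d c =>
        if d.contains c then d.insert c (d.getD c 0 + 1) else d.insert c 1)
        PySem.Dict.empty
    let fp : List Char :=
      (PySem.List.sorted chars.keys (fun x => x) false).foldl
        (fun acc k => acc ++ [k] ++ PySem.Int.toChars (chars.getD k 0)) []
    res ++ [String.ofList fp]) []

-- ===== PORT B =====
-- run-length encoding of an already-sorted character list: the inner 'while' run scan
-- is takeWhile (its length) / dropWhile (the remainder rest[k:] for the recursive call)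
def pvRle : List Char → List Char
  | [] => []
  | c :: rest =>
      (c :: PySem.Int.toChars (((rest.takeWhile (fun x => x == c)).length : Int) + 1))
        ++ pvRle (rest.dropWhile (fun x => x == c))
  termination_by s => s.length
  decreasing_by
    have := (List.dropWhile_sublist (l := rest) (p := fun x => x == c)).length_le
    simp
    omega

def word_aggregator_alt (line : String) : List String :=
  (PySem.Str.split₀ line).map
    (fun w => String.ofList (pvRle (PySem.List.sorted w.toList (fun x => x) false)))

-- ===== PRECONDITION & SPEC =====
def Spec_word_aggregator (line : String) (out : List String) : Prop := out = word_aggregator_alt line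
instance (line : String) (out : List String) : Decidable (Spec_word_aggregator line out) := by unfold Spec_word_aggregator; infer_instance

-- ===== CLAIM (what is proved, stated in full; the proofs are below) =====
def Claim_equal_word_aggregator : Prop := ∀ (line : String), Dom_word_aggregator line → Spec_word_aggregator line (word_aggregator line)

-- ===== LEMMAS AND PROOFS =====

-- sorted distinct elements of c :: rest', when c is strictly below everything in rest'
theorem sorted_ofList_cons (rest' : List Char) (c : Char) (h : c ∉ rest')
  (hlt : ∀ x ∈ rest', c < x) :
    PySem.List.sorted (PySem.Set.ofList (c :: rest')) (fun x => x) false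
      = c :: PySem.List.sorted (PySem.Set.ofList rest') (fun x => x) false := by
  apply PySem.List.sorted_eq_of_perm_of_pairwise_lt
  · rw [List.perm_ext_iff_of_nodup]
    · intro a
      simp [PySem.List.mem_sorted, PySem.Set.mem_ofList]
    · refine List.nodup_cons.mpr ⟨?_, ?_⟩
      · simp [PySem.List.mem_sorted, PySem.Set.mem_ofList]; exact h
      · exact ((PySem.List.sorted_perm (PySem.Set.ofList rest') (fun x => x) false).symm.nodup) (PySem.Set.nodup_ofList _)
    · exact PySem.Set.nodup_ofList _
  · refine List.pairwise_cons.mpr ⟨?_, ?_⟩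
    · intro x hx
      exact hlt x (by simpa [PySem.List.mem_sorted, PySem.Set.mem_ofList] using hx)
    · exact PySem.List.sorted_ofList_pairwise_lt _

-- key fact: on a (≤)-sorted character list, pvRle emits each distinct character in
-- increasing order followed by the decimal form of its multiplicity
theorem pvRle_sorted_eq (s : List Char) (hs : s.Pairwise (· ≤ ·)) :
    pvRle s = (PySem.List.sorted (PySem.Set.ofList s) (fun x => x) false).flatMap
      (fun k => k :: PySem.Int.toChars ((s.count k : Int))) := by
  induction s using pvRle.induct with
  | case1 => simp [pvRle, PySem.Set.ofList]
  | case2 c rest ih =>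
    set run := rest.takeWhile (fun x => x == c) with hrun
    set rest' := rest.dropWhile (fun x => x == c) with hrest'
    have hsplit : rest = run ++ rest' := (List.takeWhile_append_dropWhile).symm
    have hrunc : ∀ x ∈ run, x = c := by
      intro x hx
      simpa using List.mem_takeWhile_imp hx
    -- every element of rest is ≥ c
    have hge : ∀ x ∈ rest, c ≤ x := (List.pairwise_cons.mp hs).1
    have hprest : rest.Pairwise (· ≤ ·) := (List.pairwise_cons.mp hs).2
    have hprest' : rest'.Pairwise (· ≤ ·) := List.Pairwise.sublist (List.dropWhile_sublist _) hprest
    -- c is not in rest'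
    have hnotc : c ∉ rest' := by
      intro hc
      cases hr : rest' with
      | nil => rw [hr] at hc; simp at hc
      | cons h t =>
        have hh : ¬ (h == c) = true := by
          have := List.head?_dropWhile_not (p := fun x => x == c) (l := rest)
          rw [← hrest', hr] at this
          simpa using this
        have hhc : c < h := by
          have : c ≤ h := hge h (by rw [hsplit, hr]; simp)
          cases lt_or_eq_of_le this with
          | inl h' => exact h'
          | inr h' => exact absurd (by simp [h'.symm]) hh
        rw [hr] at hc
        rcases List.mem_cons.mp hc with h1 | h1
        · exact absurd h1 (ne_of_lt hhc)
        · have : h ≤ c := by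
            rw [hr] at hprest'
            exact (List.pairwise_cons.mp hprest').1 c h1
          exact absurd this (not_le.mpr hhc)
    have hlt : ∀ x ∈ rest', c < x := by
      intro x hx
      have hle : c ≤ x := hge x (by rw [hsplit]; exact List.mem_append_right _ hx)
      cases lt_or_eq_of_le hle with
      | inl h' => exact h'
      | inr h' => exact absurd (h' ▸ hx) hnotc
    -- counts
    have hcountc : (c :: rest).count c = run.length + 1 := by
      rw [hsplit, List.count_cons_self, List.count_append]
      have h1 : run.count c = run.length := List.count_eq_length.mpr (fun x hx => ((hrunc x hx).symm ▸ rfl))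
      have h2 : rest'.count c = 0 := List.count_eq_zero.mpr hnotc
      omega
    have hcountk : ∀ k, k ≠ c → (c :: rest).count k = rest'.count k := by
      intro k hk
      have hrun0 : run.count k = 0 := List.count_eq_zero.mpr (fun hm => hk (hrunc k hm))
      have hck := Ne.symm hk
      simp [hsplit, List.count_append, hrun0, hck]
    -- the sorted distinct characters split off c
    have hset : PySem.List.sorted (PySem.Set.ofList (c :: rest)) (fun x => x) false
        = c :: PySem.List.sorted (PySem.Set.ofList rest') (fun x => x) false := by
      have hperm : (PySem.Set.ofList (c :: rest)).Perm (PySem.Set.ofList (c :: rest')) := by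
        rw [List.perm_ext_iff_of_nodup (PySem.Set.nodup_ofList _) (PySem.Set.nodup_ofList _)]
        intro a
        simp only [PySem.Set.mem_ofList, hsplit, List.mem_cons, List.mem_append]
        constructor
        · rintro (h1 | h1 | h1)
          · exact Or.inl h1
          · exact Or.inl (hrunc a h1)
          · exact Or.inr h1
        · rintro (h1 | h1)
          · exact Or.inl h1
          · exact Or.inr (Or.inr h1)
      rw [PySem.List.sorted_eq_sorted_of_perm _ _ _ (fun a b h => h) hperm]
      exact sorted_ofList_cons rest' c hnotc hlt
    rw [hset]
    show pvRle (c :: rest) = _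
    rw [pvRle]
    rw [List.flatMap_cons]
    congr 1
    · rw [hcountc]; push_cast; ring_nf; rw [← hrun]
    · rw [ih hprest']
      apply List.flatMap_congr
      intro k hk
      have hkm : k ∈ rest' := by
        simpa [PySem.List.mem_sorted, PySem.Set.mem_ofList] using hk
      have hkc : k ≠ c := fun h => hnotc (h ▸ hkm)
      rw [hcountk k hkc]

-- per-word: A's dict-counting fingerprint loop equals B's rle of the sorted word
theorem fp_eq (l : List Char) :
    (PySem.List.sorted
        (l.foldl (fun d c =>
          if d.contains c then d.insert c (d.getD c 0 + 1) else d.insert c (1 : Int))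
          PySem.Dict.empty).keys (fun x => x) false).foldl
      (fun acc k => acc ++ [k] ++ PySem.Int.toChars
        ((l.foldl (fun d c =>
          if d.contains c then d.insert c (d.getD c 0 + 1) else d.insert c (1 : Int))
          PySem.Dict.empty).getD k 0)) []
    = pvRle (PySem.List.sorted l (fun x => x) false) := by
  -- A's counting loop is Counter(l)
  have hfun : (fun (d : PySem.Dict Char Int) c =>
      if d.contains c then d.insert c (d.getD c 0 + 1) else d.insert c (1 : Int))
      = fun d c => d.insert c (d.getD c 0 + 1) := by
    funext d c
    by_cases h : d.contains c
    · simp [h]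
    · simp only [h, Bool.false_eq_true, if_false]
      rw [PySem.Dict.getD_of_not_contains (h := by simpa using h)]
      norm_num
  rw [hfun, PySem.Dict.foldl_insert_getD_add_one_eq_counter, PySem.Dict.keys_counter]
  have hbody : (fun (acc : List Char) k => acc ++ [k] ++ PySem.Int.toChars ((PySem.Dict.counter l).getD k 0))
      = fun acc k => acc ++ (k :: PySem.Int.toChars ((l.count k : Int))) := by
    funext acc k
    rw [PySem.Dict.getD_counter]
    simp
  rw [hbody, PySem.List.foldl_append_eq_flatMap]
  -- B's side: rle of the sorted word, characterised by pvRle_sorted_eq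
  rw [pvRle_sorted_eq _ (PySem.List.sorted_pairwise l (fun x => x))]
  have hperm : (PySem.Set.ofList (PySem.List.sorted l (fun x => x) false)).Perm (PySem.Set.ofList l) := by
    rw [List.perm_ext_iff_of_nodup (PySem.Set.nodup_ofList _) (PySem.Set.nodup_ofList _)]
    intro a
    simp [PySem.Set.mem_ofList, PySem.List.mem_sorted]
  rw [PySem.List.sorted_eq_sorted_of_perm _ _ _ (fun a b h => h) hperm]
  simp only [List.nil_append]
  apply List.flatMap_congr
  intro k _
  rw [(PySem.List.sorted_perm l (fun x => x) false).count_eq]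

-- ===== VERDICT (by name: the statement is the Claim_ definition above) =====
theorem word_aggregator_spec : Claim_equal_word_aggregator := by
  intro line _
  unfold Spec_word_aggregator word_aggregator word_aggregator_alt
  rw [PySem.List.foldl_append_singleton_eq_map]
  simp only [List.nil_append]
  apply List.map_congr_left
  intro w _
  rw [fp_eq w.toList]
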